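-- pv_equiv track=rewrite | github.com/3k2ng/bimgus-wars | a2/data/hcc.py | hcc_decode
-- ===== SOURCE A (Python) =====
-- def hcc_decode(encoded_map):
--     decoded_map = []
--     i = 0
--     while i < len(encoded_map):
--         if encoded_map[i] == 0x7F:
--             back_i = len(decoded_map) - encoded_map[i + 1]
--             l = encoded_map[i + 2]
--             for j in range(l):
--                 decoded_map.append(decoded_map[back_i + j])
--             i += 3
--         else:
--             decoded_map.append(encoded_map[i])
--             i += 1
--     return decoded_map
-- ===== SOURCE B (Python) =====
-- def hcc_decode(encoded_map):
--     # pass 1: parse into tokens (byte, or (distance, length) pair for 0x7F refs)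
--     tokens = []
--     i = 0
--     n = len(encoded_map)
--     while i < n:
--         b = encoded_map[i]
--         if b == 0x7F:
--             tokens.append((encoded_map[i + 1], encoded_map[i + 2]))
--             i += 3
--         else:
--             tokens.append(b)
--             i += 1
--     # pass 2: expand tokens
--     out = []
--     for t in tokens:
--         if isinstance(t, tuple):
--             back = len(out) - t[0]
--             for j in range(t[1]):
--                 out.append(out[back + j])
--         else:
--             out.append(t)
--     return out
-- ===== Notes on version B (the rewrite author's own statement) =====
-- stated objective: alternative
-- what changed: Splits A's single index-jumping while loop into two passes: a parse stage that turns the byte stream into a token list (literal bytes / (distance,length) back-references), then an expand stage folding over the tokens; the byte-at-a-time overlap copy semantics is kept.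
import Mathlib
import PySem

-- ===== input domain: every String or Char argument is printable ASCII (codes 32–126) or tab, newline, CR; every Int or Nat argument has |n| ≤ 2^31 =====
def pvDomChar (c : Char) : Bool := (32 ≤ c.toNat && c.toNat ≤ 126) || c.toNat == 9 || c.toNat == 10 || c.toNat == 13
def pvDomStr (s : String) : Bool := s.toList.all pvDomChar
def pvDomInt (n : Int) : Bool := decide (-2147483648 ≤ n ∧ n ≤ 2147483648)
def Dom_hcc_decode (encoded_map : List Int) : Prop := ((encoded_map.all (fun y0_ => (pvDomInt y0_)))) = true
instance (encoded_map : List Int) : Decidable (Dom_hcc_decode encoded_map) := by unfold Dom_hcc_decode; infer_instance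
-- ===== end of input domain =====

-- B re-decomposes A's single index-jumping loop into a parse stage (token list) plus an expand stage; same cost, byte-at-a-time copy semantics preserved.

-- ===== PORT A =====
-- inner `for j in range(l): decoded_map.append(decoded_map[back_i + j])`
-- (pyGet? = Python indexing incl. negative wrap; none = IndexError, excluded by Pre_)
def hccCopyA (dec : List Int) (idx : Int) : Nat → List Int
  | 0 => dec
  | n + 1 =>
    match PySem.List.pyGet? dec idx with
    | some v => hccCopyA (dec ++ [v]) (idx + 1) n
    | none => dec

-- the while loop over the remaining suffix of encoded_map
def hccLoopA (dec : List Int) : List Int → List Int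
  | [] => dec
  | x :: rest =>
    if x = 127 then
      match rest with
      | d :: l :: rest' => hccLoopA (hccCopyA dec ((dec.length : Int) - d) l.toNat) rest'
      | _ => dec  -- Python raises IndexError here; excluded by Pre_
    else
      hccLoopA (dec ++ [x]) rest

def hcc_decode (encoded_map : List Int) : List Int := hccLoopA [] encoded_map

-- ===== PORT B =====
inductive HTok where
  | lit : Int → HTok
  | ref : Int → Int → HTok
deriving DecidableEq, Repr

-- pass 1 of Source B: tokenize
def hccParse : List Int → List HTok
  | [] => []
  | x :: rest =>
    if x = 127 then
      match rest with
      | d :: l :: rest' => HTok.ref d l :: hccParse rest'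
      | _ => []  -- Python B raises IndexError here; excluded by Pre_
    else
      HTok.lit x :: hccParse rest

-- inner `for j in range(t[1]): out.append(out[back + j])` of Source B's expand pass
def hccCopyB (out : List Int) (idx : Int) : Nat → List Int
  | 0 => out
  | n + 1 =>
    match PySem.List.pyGet? out idx with
    | some v => hccCopyB (out ++ [v]) (idx + 1) n
    | none => out

-- pass 2 of Source B: expand the token list
def hccExpand (out : List Int) : List HTok → List Int
  | [] => out
  | HTok.lit b :: ts => hccExpand (out ++ [b]) ts
  | HTok.ref d l :: ts => hccExpand (hccCopyB out ((out.length : Int) - d) l.toNat) ts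

def hcc_decode_alt (encoded_map : List Int) : List Int := hccExpand [] (hccParse encoded_map)

-- ===== PRECONDITION & SPEC =====
-- Pre_ excludes exactly the inputs on which Python A raises IndexError: a 0x7F without
-- its two following bytes, or a back-reference whose first copied index is out of range
-- for the output built so far (length `cur` tracked as a plain counter).
def hccPreAux : Int → List Int → Bool
  | _, [] => true
  | cur, x :: rest =>
    if x = 127 then
      match rest with
      | d :: l :: rest' =>
        (decide (l ≤ 0) || (decide (0 < d) && decide (d ≤ 2 * cur))) && hccPreAux (cur + max l 0) rest'
      | _ => false
    else
      hccPreAux (cur + 1) rest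

def Pre_hcc_decode (encoded_map : List Int) : Prop := hccPreAux 0 encoded_map = true
instance (encoded_map : List Int) : Decidable (Pre_hcc_decode encoded_map) := by unfold Pre_hcc_decode; infer_instance

def pvWitness_hcc_decode : List Int := [1, 2, 127, 2, 3]

def Spec_hcc_decode (encoded_map : List Int) (out : List Int) : Prop := out = hcc_decode_alt encoded_map
instance (encoded_map : List Int) (out : List Int) : Decidable (Spec_hcc_decode encoded_map out) := by unfold Spec_hcc_decode; infer_instance

-- ===== CLAIM (what is proved, stated in full; the proofs are below) =====
def Claim_equal_hcc_decode : Prop := ∀ (encoded_map : List Int), Dom_hcc_decode encoded_map → Pre_hcc_decode encoded_map → Spec_hcc_decode encoded_map (hcc_decode encoded_map)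

-- ===== LEMMAS AND PROOFS =====
theorem hccCopyA_eq_B (idx : Int) (n : Nat) : ∀ (dec : List Int), hccCopyA dec idx n = hccCopyB dec idx n := by
  induction n generalizing idx with
  | zero => intro dec; rfl
  | succ n ih =>
    intro dec
    simp only [hccCopyA, hccCopyB]
    cases PySem.List.pyGet? dec idx with
    | none => rfl
    | some v => exact ih (idx + 1) (dec ++ [v])

theorem hccLoopA_eq_expand_parse (rest : List Int) : ∀ (dec : List Int), hccLoopA dec rest = hccExpand dec (hccParse rest) := by
  induction rest using hccParse.induct with
  | case1 => intro dec; rfl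
  | case2 d l rest' ih =>
    intro dec
    simp only [hccLoopA, hccParse, if_true, hccExpand, hccCopyA_eq_B]
    exact ih _
  | case3 rest h2 =>
    intro dec
    cases rest with
    | nil => simp [hccLoopA, hccParse, hccExpand]
    | cons a rest'' =>
      cases rest'' with
      | nil => simp [hccLoopA, hccParse, hccExpand]
      | cons b r => exact absurd rfl (h2 a b r)
  | case4 x rest hx ih =>
    intro dec
    rw [hccLoopA.eq_def, hccParse.eq_def]
    simp only [if_neg hx, hccExpand]
    exact ih _

-- ===== VERDICT (by name: the statement is the Claim_ definition above) =====
theorem hcc_decode_spec : Claim_equal_hcc_decode := by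
  intro encoded_map _ _
  unfold Spec_hcc_decode hcc_decode hcc_decode_alt
  exact hccLoopA_eq_expand_parse encoded_map []
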